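-- pv_equiv track=rewrite | github.com/FTdiscovery/KMNBox | FastTablebase.py | legal
-- ===== SOURCE A (Python) =====
-- m = 11
--
-- n = 3
--
-- def legal(state, p, z=False):
--     possible = set()
--     failed = set()
--     if min(state) == max(state) and z:
--         for i in range(int((n + 1) / 2)):
--             for j in range(int((m + 1) / 2)):
--                 possible.add(i * m + j)
--         return possible
--     for i in range(m * n): possible.add(i)
--     for i in range(m * n):
--         if state[i] == p:
--             if i - m >= 0: failed.add(i - m)
--             if i % m != 0: failed.add(i - 1)
--             if i % m != m - 1: failed.add(i + 1)
--             if i + m < m * n: failed.add(i + m)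
--         if state[i] != 0: failed.add(i)
--     return possible.difference(failed)
-- ===== SOURCE B (Python) =====
-- m = 11
--
-- n = 3
--
-- def legal(state, p, z=False):
--     if min(state) == max(state) and z:
--         return {i * m + j for i in range(int((n + 1) / 2)) for j in range(int((m + 1) / 2))}
--     out = set()
--     for i in range(m * n):
--         if state[i] == 0 \
--            and not (i - m >= 0 and state[i - m] == p) \
--            and not (i % m != 0 and state[i - 1] == p) \
--            and not (i % m != m - 1 and state[i + 1] == p) \
--            and not (i + m < m * n and state[i + m] == p):
--             out.add(i)
--     return out
-- ===== Notes on version B (the rewrite author's own statement) =====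
-- stated objective: simpler
-- what changed: Replaces the scatter strategy (universe set minus a 'failed' set collected from each occupied cell's neighbours) with a direct per-cell legality test: one loop that adds cell i iff it is empty and no in-bounds neighbour holds p, maintaining only the output set.
import Mathlib
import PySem

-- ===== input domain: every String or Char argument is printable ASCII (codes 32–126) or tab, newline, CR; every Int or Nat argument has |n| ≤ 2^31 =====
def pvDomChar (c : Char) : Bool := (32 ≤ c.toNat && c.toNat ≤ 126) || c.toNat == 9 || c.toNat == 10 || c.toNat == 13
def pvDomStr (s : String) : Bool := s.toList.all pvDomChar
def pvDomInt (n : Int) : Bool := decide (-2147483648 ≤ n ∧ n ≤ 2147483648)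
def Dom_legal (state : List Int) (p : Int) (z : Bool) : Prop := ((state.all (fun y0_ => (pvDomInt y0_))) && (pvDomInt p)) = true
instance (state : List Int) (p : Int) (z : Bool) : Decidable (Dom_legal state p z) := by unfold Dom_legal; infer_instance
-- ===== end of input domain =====

-- B replaces A's universe-minus-failed scatter with a direct per-cell legality test (objective: simpler).

-- ===== PORT A =====
-- one iteration of A's 'failed'-collection loop (state[i] is pyGetD; indices used are in range under Pre_)
def legalStep (state : List Int) (p : Int) (f : PySem.Set Int) (i : Int) : PySem.Set Int :=
  let f1 :=
    if PySem.List.pyGetD state i 0 = p then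
      let a := if 0 ≤ i - 11 then PySem.Set.add f (i - 11) else f
      let b := if PySem.Int.mod i 11 ≠ 0 then PySem.Set.add a (i - 1) else a
      let c := if PySem.Int.mod i 11 ≠ 10 then PySem.Set.add b (i + 1) else b
      if i + 11 < 33 then PySem.Set.add c (i + 11) else c
    else f
  if PySem.List.pyGetD state i 0 ≠ 0 then PySem.Set.add f1 i else f1

-- m = 11, n = 3; int((n+1)/2) = 2, int((m+1)/2) = 6, m*n = 33
def legal (state : List Int) (p : Int) (z : Bool) : List Int :=
  if ((PySem.List.min? state (fun x => x) == PySem.List.max? state (fun x => x)) && z) = true then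
    (PySem.List.pyRange 0 2).foldl
      (fun s i => (PySem.List.pyRange 0 6).foldl (fun s j => PySem.Set.add s (i * 11 + j)) s)
      PySem.Set.empty
  else
    let possible := (PySem.List.pyRange 0 33).foldl PySem.Set.add PySem.Set.empty
    let failed := (PySem.List.pyRange 0 33).foldl (legalStep state p) PySem.Set.empty
    PySem.Set.diff possible failed

-- ===== PORT B =====
-- B's per-cell legality test: cell i is empty and no in-bounds neighbour holds p
def okCell (state : List Int) (p : Int) (i : Int) : Bool :=
  PySem.List.pyGetD state i 0 == 0 &&
  !(decide (0 ≤ i - 11) && PySem.List.pyGetD state (i - 11) 0 == p) &&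
  !(PySem.Int.mod i 11 != 0 && PySem.List.pyGetD state (i - 1) 0 == p) &&
  !(PySem.Int.mod i 11 != 10 && PySem.List.pyGetD state (i + 1) 0 == p) &&
  !(decide (i + 11 < 33) && PySem.List.pyGetD state (i + 11) 0 == p)

def legal_alt (state : List Int) (p : Int) (z : Bool) : List Int :=
  if ((PySem.List.min? state (fun x => x) == PySem.List.max? state (fun x => x)) && z) = true then
    PySem.Set.ofList ((PySem.List.pyRange 0 2).flatMap
      (fun i => (PySem.List.pyRange 0 6).map (fun j => i * 11 + j)))
  else
    (PySem.List.pyRange 0 33).foldl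
      (fun out i => if okCell state p i then PySem.Set.add out i else out) PySem.Set.empty

-- ===== PRECONDITION & SPEC =====
-- A raises on the empty list (min() of an empty sequence) and, when the constant-board shortcut
-- is not taken, IndexError on lists shorter than m*n = 33; Pre_ admits exactly the inputs where A returns.
def Pre_legal (state : List Int) (p : Int) (z : Bool) : Prop :=
  state ≠ [] ∧ (33 ≤ state.length ∨ (z = true ∧ state.all (fun x => x == state.headD 0) = true))
instance (state : List Int) (p : Int) (z : Bool) : Decidable (Pre_legal state p z) := by
  unfold Pre_legal; infer_instance

def pvWitness_legal : List Int × Int × Bool := (List.replicate 33 0, 1, false)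

def Spec_legal (state : List Int) (p : Int) (z : Bool) (out : List Int) : Prop := out = legal_alt state p z
instance (state : List Int) (p : Int) (z : Bool) (out : List Int) : Decidable (Spec_legal state p z out) := by unfold Spec_legal; infer_instance

-- ===== CLAIM (what is proved, stated in full; the proofs are below) =====
def Claim_equal_legal : Prop := ∀ (state : List Int) (p : Int) (z : Bool), Dom_legal state p z → Pre_legal state p z → Spec_legal state p z (legal state p z)

-- ===== LEMMAS AND PROOFS =====

-- what one iteration of A's loop contributes to 'failed'
def contrib (state : List Int) (p : Int) (i k : Int) : Prop :=
  (PySem.List.pyGetD state i 0 = p ∧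
    ((0 ≤ i - 11 ∧ k = i - 11) ∨ (PySem.Int.mod i 11 ≠ 0 ∧ k = i - 1) ∨
     (PySem.Int.mod i 11 ≠ 10 ∧ k = i + 1) ∨ (i + 11 < 33 ∧ k = i + 11)))
  ∨ (PySem.List.pyGetD state i 0 ≠ 0 ∧ k = i)

set_option maxHeartbeats 1000000 in
lemma mem_legalStep (state : List Int) (p : Int) (f : PySem.Set Int) (i k : Int) :
    k ∈ legalStep state p f i ↔ k ∈ f ∨ contrib state p i k := by
  unfold legalStep contrib
  split_ifs <;> simp only [PySem.Set.mem_add] <;> tauto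

lemma mem_foldl_legalStep (state : List Int) (p : Int) :
    ∀ (l : List Int) (s : PySem.Set Int) (k : Int),
      k ∈ l.foldl (legalStep state p) s ↔ k ∈ s ∨ ∃ i ∈ l, contrib state p i k := by
  intro l
  induction l with
  | nil => simp
  | cons x t ih =>
    intro s k
    simp only [List.foldl_cons, ih, mem_legalStep, List.mem_cons]
    constructor
    · rintro ((h | h) | ⟨i, hi, hc⟩)
      · exact Or.inl h
      · exact Or.inr ⟨x, Or.inl rfl, h⟩
      · exact Or.inr ⟨i, Or.inr hi, hc⟩
    · rintro (h | ⟨i, (rfl | hi), hc⟩)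
      · exact Or.inl (Or.inl h)
      · exact Or.inl (Or.inr hc)
      · exact Or.inr ⟨i, hi, hc⟩

lemma foldl_addIf (q : Int → Bool) :
    ∀ (l : List Int) (s : PySem.Set Int), l.Nodup → (∀ i ∈ l, i ∉ s) →
      l.foldl (fun out i => if q i then PySem.Set.add out i else out) s = s ++ l.filter q := by
  intro l
  induction l with
  | nil => simp
  | cons x t ih =>
    intro s hnd hfresh
    simp only [List.foldl_cons, List.filter_cons]
    rcases List.nodup_cons.mp hnd with ⟨hxt, hnt⟩
    by_cases hq : q x = true
    · rw [if_pos hq, if_pos hq,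
        PySem.Set.add_of_not_mem (hfresh x List.mem_cons_self),
        ih (s ++ [x]) hnt]
      · simp
      · intro i hi
        simp only [List.mem_append, List.mem_singleton]
        rintro (h | rfl)
        · exact hfresh i (List.mem_cons_of_mem _ hi) h
        · exact hxt hi
    · rw [if_neg hq, if_neg hq, ih s hnt (fun i hi => hfresh i (List.mem_cons_of_mem _ hi))]

lemma okCell_iff (state : List Int) (p : Int) (k : Int) :
    okCell state p k = true ↔
      (PySem.List.pyGetD state k 0 = 0 ∧
       ¬(0 ≤ k - 11 ∧ PySem.List.pyGetD state (k - 11) 0 = p) ∧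
       ¬(PySem.Int.mod k 11 ≠ 0 ∧ PySem.List.pyGetD state (k - 1) 0 = p) ∧
       ¬(PySem.Int.mod k 11 ≠ 10 ∧ PySem.List.pyGetD state (k + 1) 0 = p) ∧
       ¬(k + 11 < 33 ∧ PySem.List.pyGetD state (k + 11) 0 = p)) := by
  simp only [okCell, Bool.and_eq_true, Bool.not_eq_true', Bool.and_eq_false_iff,
    beq_iff_eq, beq_eq_false_iff_ne, ne_eq, bne_eq_false_iff_eq,
    decide_eq_false_iff_not, not_and]
  tauto

-- the crux: a cell k of the board survives A's 'failed' set iff B's per-cell test accepts it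
lemma failed_iff_ok (state : List Int) (p : Int) (k : Int) (hk0 : 0 ≤ k) (hk1 : k < 33) :
    (¬ ∃ i ∈ PySem.List.pyRange 0 33, contrib state p i k) ↔ okCell state p k = true := by
  have hmod : ∀ x : Int, PySem.Int.mod x 11 = x % 11 :=
    fun x => PySem.Int.mod_eq_emod_of_pos (by omega)
  rw [okCell_iff]
  simp only [hmod, contrib, PySem.List.mem_pyRange_one]
  constructor
  · intro h
    have hno : ∀ i : Int, 0 ≤ i → i < 33 →
        ¬ ((PySem.List.pyGetD state i 0 = p ∧
            ((0 ≤ i - 11 ∧ k = i - 11) ∨ (i % 11 ≠ 0 ∧ k = i - 1) ∨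
             (i % 11 ≠ 10 ∧ k = i + 1) ∨ (i + 11 < 33 ∧ k = i + 11)))
          ∨ (PySem.List.pyGetD state i 0 ≠ 0 ∧ k = i)) := by
      intro i h0 h1 hc
      exact h ⟨i, ⟨h0, h1⟩, hc⟩
    refine ⟨?_, ?_, ?_, ?_, ?_⟩
    · by_contra hne
      exact hno k hk0 hk1 (Or.inr ⟨hne, rfl⟩)
    · rintro ⟨hb, hp⟩
      exact hno (k - 11) (by omega) (by omega)
        (Or.inl ⟨hp, Or.inr (Or.inr (Or.inr ⟨by omega, by omega⟩))⟩)
    · rintro ⟨hb, hp⟩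
      exact hno (k - 1) (by omega) (by omega)
        (Or.inl ⟨hp, Or.inr (Or.inr (Or.inl ⟨by omega, by omega⟩))⟩)
    · rintro ⟨hb, hp⟩
      exact hno (k + 1) (by omega) (by omega)
        (Or.inl ⟨hp, Or.inr (Or.inl ⟨by omega, by omega⟩)⟩)
    · rintro ⟨hb, hp⟩
      exact hno (k + 11) (by omega) (by omega)
        (Or.inl ⟨hp, Or.inl ⟨by omega, by omega⟩⟩)
  · rintro ⟨h0, h1, h2, h3, h4⟩ ⟨i, ⟨hi0, hi1⟩, hc⟩
    rcases hc with ⟨hp, hnb⟩ | ⟨hnz, rfl⟩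
    · rcases hnb with ⟨hb, rfl⟩ | ⟨hb, rfl⟩ | ⟨hb, rfl⟩ | ⟨hb, rfl⟩
      · exact h4 ⟨by omega, by rwa [show i - 11 + 11 = i by omega]⟩
      · exact h3 ⟨by omega, by rwa [show i - 1 + 1 = i by omega]⟩
      · exact h2 ⟨by omega, by rwa [show i + 1 - 1 = i by omega]⟩
      · exact h1 ⟨by omega, by rwa [show i + 11 - 11 = i by omega]⟩
    · exact hnz h0

-- ===== VERDICT (by name: the statement is the Claim_ definition above) =====
theorem legal_spec : Claim_equal_legal := by
  intro state p z _ _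
  unfold Spec_legal legal legal_alt
  by_cases hbr : ((PySem.List.min? state (fun x => x) == PySem.List.max? state (fun x => x)) && z) = true
  · rw [if_pos hbr, if_pos hbr]
    decide
  · rw [if_neg hbr, if_neg hbr]
    have hposs : (PySem.List.pyRange 0 33).foldl PySem.Set.add PySem.Set.empty
        = PySem.List.pyRange (0 : Int) 33 := by decide
    rw [hposs, foldl_addIf (okCell state p) (PySem.List.pyRange 0 33) PySem.Set.empty
      (by decide) (by intro i _ hi; exact absurd hi (List.not_mem_nil))]
    show PySem.Set.diff _ _ = _
    unfold PySem.Set.diff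
    simp only [PySem.Set.empty, List.nil_append]
    apply List.filter_congr
    intro k hk
    have hk' := PySem.List.mem_pyRange_one.mp hk
    have hmem := mem_foldl_legalStep state p (PySem.List.pyRange 0 33) PySem.Set.empty k
    have hiff := failed_iff_ok state p k hk'.1 hk'.2
    by_cases hok : okCell state p k = true
    · rw [hok, Bool.not_eq_true', Bool.eq_false_iff]
      intro hct
      exact (hiff.mpr hok) (by
        have := (PySem.Set.contains_iff _ _).mp hct
        rcases (hmem.mp this) with h | h
        · exact absurd h (List.not_mem_nil)
        · exact h)
    · rw [Bool.not_eq_true] at hok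
      rw [hok, Bool.not_eq_false']
      apply (PySem.Set.contains_iff _ _).mpr
      refine (mem_foldl_legalStep state p _ [] k).mpr (Or.inr ?_)
      by_contra hno
      rw [hiff] at hno
      exact absurd hno (by simp [hok])
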